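-- pv_equiv track=rewrite | github.com/bjiang518/studyai-ai-engine | src/services/openai_service.py | _detect_mathematical_content
-- ===== SOURCE A (Python) =====
-- def _detect_mathematical_content(content: str) -> bool:
--     """Detect if extracted content contains mathematical expressions."""
--     math_indicators = [
--         '\\(', '\\)', '\\[', '\\]',  # LaTeX delimiters
--         'frac{', 'sqrt{', '^{', '_{',  # LaTeX functions
--         '=', '+', '-', '×', '÷', '*', '/',  # Math operators
--         'π', 'α', 'β', 'γ', 'δ', 'θ',  # Greek letters
--         '∫', '∑', '√', '≤', '≥', '≠',  # Math symbols
--         'equation', 'formula', 'solve', 'calculate'  # Math keywords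
--     ]
--
--     content_lower = content.lower()
--     return any(indicator in content_lower for indicator in math_indicators)
-- ===== SOURCE B (Python) =====
-- _MATH_SINGLE_CHARS = frozenset('=+-\u00d7\u00f7*/\u03c0\u03b1\u03b2\u03b3\u03b4\u03b8\u222b\u2211\u221a\u2264\u2265\u2260')
-- _MATH_MULTI = ('\\(', '\\)', '\\[', '\\]', 'frac{', 'sqrt{', '^{', '_{',
--                'equation', 'formula', 'solve', 'calculate')
--
--
-- def _detect_mathematical_content(content: str) -> bool:
--     """Single left-to-right scan over the lowercased text: at each position test
--     the character against a set of one-char indicators and the few multi-char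
--     indicators as prefixes, instead of one full substring scan per indicator."""
--     s = content.lower()
--     for i, ch in enumerate(s):
--         if ch in _MATH_SINGLE_CHARS:
--             return True
--         if any(s.startswith(m, i) for m in _MATH_MULTI):
--             return True
--     return False
-- ===== Notes on version B (the rewrite author's own statement) =====
-- stated objective: alternative
-- what changed: Replaces A's per-indicator repeated substring scans (any of 31 'in' tests) with a single left-to-right scan over the lowercased text that checks each position once against a one-char indicator set and the few multi-char indicators as prefixes.
import Mathlib
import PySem

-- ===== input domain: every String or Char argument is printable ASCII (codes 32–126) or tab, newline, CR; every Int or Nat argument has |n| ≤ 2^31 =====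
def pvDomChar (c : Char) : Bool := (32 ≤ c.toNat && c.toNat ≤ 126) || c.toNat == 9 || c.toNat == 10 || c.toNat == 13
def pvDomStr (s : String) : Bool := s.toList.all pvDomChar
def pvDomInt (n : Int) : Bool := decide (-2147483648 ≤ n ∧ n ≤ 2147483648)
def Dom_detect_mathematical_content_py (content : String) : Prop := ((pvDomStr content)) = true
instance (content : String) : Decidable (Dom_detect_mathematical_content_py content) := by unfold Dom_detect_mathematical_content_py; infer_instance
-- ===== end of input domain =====

-- B replaces A's 31 per-indicator substring scans by one left-to-right scan of the
-- lowercased text (char-set test + prefix tests at each position); same return value.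

-- ===== PORT A =====
def pvMathIndicators : List String :=
  ["\\(", "\\)", "\\[", "\\]",
   "frac{", "sqrt{", "^{", "_{",
   "=", "+", "-", "×", "÷", "*", "/",
   "π", "α", "β", "γ", "δ", "θ",
   "∫", "∑", "√", "≤", "≥", "≠",
   "equation", "formula", "solve", "calculate"]

def detect_mathematical_content_py (content : String) : Bool :=
  let content_lower := PySem.Str.lower content
  pvMathIndicators.any (fun indicator => PySem.Str.isIn indicator content_lower)

-- ===== PORT B =====
def pvMathSingleCharList : List Char :=
  ['=', '+', '-', '×', '÷', '*', '/', 'π', 'α', 'β', 'γ', 'δ', 'θ', '∫', '∑', '√', '≤', '≥', '≠']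

def pvMathSingleChars : PySem.Set Char := PySem.Set.ofList pvMathSingleCharList

def pvMathMulti : List String :=
  ["\\(", "\\)", "\\[", "\\]", "frac{", "sqrt{", "^{", "_{",
   "equation", "formula", "solve", "calculate"]

-- the 'for i, ch in enumerate(s)' loop of Source B; s.startswith(m, i) is startswith on the suffix at i
def pvScan (s : List Char) : Bool :=
  match s with
  | [] => false
  | ch :: rest =>
    if PySem.Set.contains pvMathSingleChars ch then true
    else if pvMathMulti.any (fun m => PySem.Chars.startswith (ch :: rest) m.toList) then true
    else pvScan rest

def detect_mathematical_content_py_alt (content : String) : Bool :=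
  pvScan (PySem.Str.lower content).toList

-- ===== PRECONDITION & SPEC =====
def Spec_detect_mathematical_content_py (content : String) (out : Bool) : Prop := out = detect_mathematical_content_py_alt content
instance (content : String) (out : Bool) : Decidable (Spec_detect_mathematical_content_py content out) := by unfold Spec_detect_mathematical_content_py; infer_instance

-- ===== CLAIM (what is proved, stated in full; the proofs are below) =====
def Claim_equal_detect_mathematical_content_py : Prop := ∀ (content : String), Dom_detect_mathematical_content_py content → Spec_detect_mathematical_content_py content (detect_mathematical_content_py content)

-- ===== LEMMAS AND PROOFS =====

-- the per-position hit condition of pvScan, as a Prop on the suffix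
def pvHit (t : List Char) : Prop :=
  (∃ c ∈ pvMathSingleCharList, [c] <+: t) ∨ (∃ m ∈ pvMathMulti, m.toList <+: t)

lemma pvScan_iff (l : List Char) : pvScan l = true ↔ ∃ t, t <:+ l ∧ pvHit t := by
  induction l with
  | nil =>
      simp only [pvScan, Bool.false_eq_true, false_iff]
      rintro ⟨t, ht, hhit⟩
      rw [List.suffix_nil] at ht
      subst ht
      rcases hhit with ⟨c, _, hp⟩ | ⟨m, hm, hp⟩
      · simp at hp
      · rw [List.prefix_nil] at hp
        fin_cases hm <;> simp at hp
  | cons ch rest ih =>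
      by_cases h1 : PySem.Set.contains pvMathSingleChars ch = true
      · simp only [pvScan, h1, if_true, true_iff]
        refine ⟨ch :: rest, List.suffix_refl _, Or.inl ⟨ch, ?_, ?_⟩⟩
        · rw [PySem.Set.contains_iff] at h1
          simpa [pvMathSingleChars, PySem.Set.mem_ofList] using h1
        · exact List.cons_prefix_cons.mpr ⟨rfl, List.nil_prefix⟩
      · by_cases h2 : pvMathMulti.any (fun m => PySem.Chars.startswith (ch :: rest) m.toList) = true
        · simp only [pvScan]
          rw [if_neg h1, if_pos h2]
          simp only [true_iff]
          rw [List.any_eq_true] at h2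
          obtain ⟨m, hm, hsw⟩ := h2
          rw [PySem.Chars.startswith_iff] at hsw
          exact ⟨ch :: rest, List.suffix_refl _, Or.inr ⟨m, hm, hsw⟩⟩
        · simp only [pvScan]
          rw [if_neg h1, if_neg h2, ih]
          constructor
          · rintro ⟨t, ht, hhit⟩
            exact ⟨t, ht.trans (List.suffix_cons ch rest), hhit⟩
          · rintro ⟨t, ht, hhit⟩
            rw [List.suffix_cons_iff] at ht
            rcases ht with rfl | ht
            · exfalso
              rcases hhit with ⟨c, hc, hp⟩ | ⟨m, hm, hp⟩
              · obtain ⟨rfl, -⟩ := List.cons_prefix_cons.mp hp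
                exact h1 (by rw [PySem.Set.contains_iff]; simpa [pvMathSingleChars, PySem.Set.mem_ofList] using hc)
              · exact h2 (List.any_eq_true.mpr ⟨m, hm, by rw [PySem.Chars.startswith_iff]; exact hp⟩)
            · exact ⟨t, ht, hhit⟩

set_option maxHeartbeats 2000000 in
lemma pvSplit (l : List Char) :
    (∃ ind ∈ pvMathIndicators, ind.toList <:+: l) ↔
      (∃ c ∈ pvMathSingleCharList, [c] <:+: l) ∨ (∃ m ∈ pvMathMulti, m.toList <:+: l) := by
  have h1 : ∀ x ∈ pvMathIndicators, x ∈ (pvMathSingleCharList.map (fun c => String.ofList [c])) ++ pvMathMulti := by decide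
  have h2 : ∀ x ∈ (pvMathSingleCharList.map (fun c => String.ofList [c])) ++ pvMathMulti, x ∈ pvMathIndicators := by decide
  constructor
  · rintro ⟨ind, hmem, h⟩
    rcases List.mem_append.mp (h1 ind hmem) with hmem' | hmem'
    · obtain ⟨c, hc, rfl⟩ := List.mem_map.mp hmem'
      exact Or.inl ⟨c, hc, by simpa using h⟩
    · exact Or.inr ⟨ind, hmem', h⟩
  · rintro (⟨c, hc, h⟩ | ⟨m, hm, h⟩)
    · exact ⟨String.ofList [c], h2 _ (List.mem_append.mpr (Or.inl (List.mem_map.mpr ⟨c, hc, rfl⟩))), by simpa using h⟩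
    · exact ⟨m, h2 _ (List.mem_append.mpr (Or.inr hm)), h⟩

theorem detect_mathematical_content_py_spec : Claim_equal_detect_mathematical_content_py := by
  intro content _
  unfold Spec_detect_mathematical_content_py
  rw [Bool.eq_iff_iff]
  simp only [detect_mathematical_content_py, detect_mathematical_content_py_alt,
    List.any_eq_true, PySem.Str.isIn_iff_infix]
  rw [pvScan_iff, pvSplit]
  constructor
  · rintro (⟨c, hc, h⟩ | ⟨m, hm, h⟩)
    · obtain ⟨t, hp, hs⟩ := List.infix_iff_prefix_suffix.mp h
      exact ⟨t, hs, Or.inl ⟨c, hc, hp⟩⟩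
    · obtain ⟨t, hp, hs⟩ := List.infix_iff_prefix_suffix.mp h
      exact ⟨t, hs, Or.inr ⟨m, hm, hp⟩⟩
  · rintro ⟨t, hs, ⟨c, hc, hp⟩ | ⟨m, hm, hp⟩⟩
    · exact Or.inl ⟨c, hc, List.infix_iff_prefix_suffix.mpr ⟨t, hp, hs⟩⟩
    · exact Or.inr ⟨m, hm, List.infix_iff_prefix_suffix.mpr ⟨t, hp, hs⟩⟩
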